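-- pv_equiv track=rewrite | github.com/alstjrwjd99/BaekJun | 프로그래머스/3/77886. 110 옮기기/110 옮기기.py | solution
-- ===== SOURCE A (Python) =====
-- def solution(s):
--     def find_110(x):
--         stack = []
--         cnt_110 = 0
--
--         for char in x:
--             stack.append(char)
--             if len(stack) >= 3 and stack[-3:] == ['1','1','0']:
--                 stack.pop()
--                 stack.pop()
--                 stack.pop()
--                 cnt_110 += 1
--
--         new_x = ''.join(stack)
--         idx = new_x.rfind('0') + 1
--         return new_x[:idx] + '110' * cnt_110 + new_x[idx:]
--
--
--     return [find_110(x) for x in s]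
-- ===== SOURCE B (Python) =====
-- def solution(s):
--     def reduce(x):
--         res = ''
--         ones = 0
--         cnt = 0
--         for c in x:
--             if c == '1':
--                 ones += 1
--             elif c == '0' and ones >= 2:
--                 ones -= 2
--                 cnt += 1
--             else:
--                 res += '1' * ones + c
--                 ones = 0
--         new_x = res + '1' * ones
--         idx = new_x.rfind('0') + 1
--         return new_x[:idx] + '110' * cnt + new_x[idx:]
--     return [reduce(x) for x in s]
-- ===== Notes on version B (the rewrite author's own statement) =====
-- stated objective: simpler
-- what changed: Replaces A's explicit character stack and per-step last-3-elements suffix comparison with a single integer run-length counter of trailing '1's plus an output accumulator; '110' removal becomes counter arithmetic (ones -= 2) instead of three stack pops.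
import Mathlib
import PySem

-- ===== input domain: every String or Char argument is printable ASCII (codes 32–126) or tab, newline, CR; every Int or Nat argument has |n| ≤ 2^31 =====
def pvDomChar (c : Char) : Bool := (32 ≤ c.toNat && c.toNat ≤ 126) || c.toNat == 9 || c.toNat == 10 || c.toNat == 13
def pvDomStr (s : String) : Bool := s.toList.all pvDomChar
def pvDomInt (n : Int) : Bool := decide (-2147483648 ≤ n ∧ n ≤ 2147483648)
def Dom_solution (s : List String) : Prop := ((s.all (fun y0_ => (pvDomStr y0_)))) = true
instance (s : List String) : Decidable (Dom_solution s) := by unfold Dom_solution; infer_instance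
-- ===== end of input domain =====

-- B replaces A's explicit character stack by a run-length counter of trailing '1's
-- plus an output accumulator (objective: simpler — no stack, no suffix comparison).

-- ===== PORT A =====
-- one iteration of A's for-loop: append char, pop a trailing "110" if present
def pvStepA (st : List Char × Nat) (c : Char) : List Char × Nat :=
  let stack := st.1 ++ [c]
  -- len(stack) >= 3 and stack[-3:] == ['1','1','0']
  if 3 ≤ stack.length ∧ PySem.List.slice stack (some (-3)) none = ['1', '1', '0'] then
    -- three stack.pop() calls (each removes the last element)
    (stack.dropLast.dropLast.dropLast, st.2 + 1)
  else (stack, st.2)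

def pvFind110 (x : String) : String :=
  let r := x.toList.foldl pvStepA ([], 0)
  let newx := r.1                                   -- ''.join(stack)
  let idx : Int := PySem.Chars.rfind newx ['0'] + 1 -- new_x.rfind('0') + 1
  -- new_x[:idx] + '110' * cnt_110 + new_x[idx:]
  String.ofList (PySem.List.slice newx none (some idx)
    ++ PySem.List.pyRepeat ['1', '1', '0'] (r.2 : Int)
    ++ PySem.List.slice newx (some idx) none)

def solution (s : List String) : List String := s.map pvFind110

-- ===== PORT B =====
-- one iteration of B's for-loop over state (res, ones, cnt)
def pvStepB (st : List Char × Nat × Nat) (c : Char) : List Char × Nat × Nat :=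
  if c = '1' then (st.1, st.2.1 + 1, st.2.2)
  else if c = '0' ∧ 2 ≤ st.2.1 then (st.1, st.2.1 - 2, st.2.2 + 1)
  else (st.1 ++ List.replicate st.2.1 '1' ++ [c], 0, st.2.2)

def pvReduce (x : String) : String :=
  let r := x.toList.foldl pvStepB ([], 0, 0)
  let newx := r.1 ++ List.replicate r.2.1 '1'       -- res + '1' * ones
  let idx : Int := PySem.Chars.rfind newx ['0'] + 1 -- new_x.rfind('0') + 1
  -- new_x[:idx] + '110' * cnt + new_x[idx:]
  String.ofList (PySem.List.slice newx none (some idx)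
    ++ PySem.List.pyRepeat ['1', '1', '0'] (r.2.2 : Int)
    ++ PySem.List.slice newx (some idx) none)

def solution_alt (s : List String) : List String := s.map pvReduce

-- ===== PRECONDITION & SPEC =====
def Spec_solution (s : List String) (out : List String) : Prop := out = solution_alt s
instance (s : List String) (out : List String) : Decidable (Spec_solution s out) := by unfold Spec_solution; infer_instance

-- ===== CLAIM (what is proved, stated in full; the proofs are below) =====
def Claim_equal_solution : Prop := ∀ (s : List String), Dom_solution s → Spec_solution s (solution s)

-- ===== LEMMAS AND PROOFS =====

-- A's pop condition holds exactly when the stack ends in "110"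
theorem pvCondA_iff (l : List Char) :
    (3 ≤ l.length ∧ PySem.List.slice l (some (-3)) none = ['1', '1', '0'])
      ↔ ∃ t, l = t ++ ['1', '1', '0'] := by
  rw [PySem.List.slice_from_neg_ofNat l 3 (by omega)]
  constructor
  · rintro ⟨h3, hd⟩
    exact ⟨l.take (l.length - 3), by rw [← hd, List.take_append_drop]⟩
  · rintro ⟨t, rfl⟩
    constructor
    · simp
    · have : (t ++ ['1', '1', '0']).length - 3 = t.length := by simp
      rw [this, List.drop_left]

theorem pvConcat_inj {α : Type} (a b : List α) (x y : α) (h : a ++ [x] = b ++ [y]) :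
    a = b ∧ x = y := by
  have := List.append_inj' h (by simp)
  exact ⟨this.1, by simpa using this.2⟩

-- main loop invariant: A's stack is B's res ++ '1'*ones, provided res never ends in '1'
theorem pvLoop_eq (xs : List Char) (res : List Char) (ones cnt : Nat)
    (hres : res.getLast? ≠ some '1') :
    xs.foldl pvStepA (res ++ List.replicate ones '1', cnt)
      = (let r := xs.foldl pvStepB (res, ones, cnt);
         (r.1 ++ List.replicate r.2.1 '1', r.2.2)) := by
  induction xs generalizing res ones cnt with
  | nil => rfl
  | cons c xs ih =>
    simp only [List.foldl_cons]
    by_cases hc1 : c = '1'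
    · -- push a '1': the pop condition cannot fire (stack ends in '1')
      subst hc1
      have hcond : ¬ (3 ≤ (res ++ List.replicate ones '1' ++ ['1']).length ∧
          PySem.List.slice (res ++ List.replicate ones '1' ++ ['1']) (some (-3)) none
            = ['1', '1', '0']) := by
        rw [pvCondA_iff]
        rintro ⟨t, ht⟩
        have h' : (res ++ List.replicate ones '1') ++ ['1'] = (t ++ ['1', '1']) ++ ['0'] := by
          simpa using ht
        have := (pvConcat_inj _ _ _ _ h').2
        simp at this
      have hA : pvStepA (res ++ List.replicate ones '1', cnt) '1'
          = (res ++ List.replicate (ones + 1) '1', cnt) := by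
        simp only [pvStepA, if_neg hcond]
        simp [List.replicate_succ', List.append_assoc]
      have hB : pvStepB (res, ones, cnt) '1' = (res, ones + 1, cnt) := by
        simp [pvStepB]
      rw [hA, hB, ih res (ones + 1) cnt hres]
    · by_cases hc0 : c = '0' ∧ 2 ≤ ones
      · -- pop a "110"
        obtain ⟨hc0', h2⟩ := hc0
        have hsplit : res ++ List.replicate ones '1' ++ [c]
            = (res ++ List.replicate (ones - 2) '1') ++ ['1', '1', '0'] := by
          subst hc0'
          have : List.replicate ones '1' = List.replicate (ones - 2) '1' ++ ['1', '1'] := by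
            have : ones = (ones - 2) + 2 := by omega
            rw [this, List.replicate_add]; simp
          rw [this]; simp
        have hcond : 3 ≤ (res ++ List.replicate ones '1' ++ [c]).length ∧
            PySem.List.slice (res ++ List.replicate ones '1' ++ [c]) (some (-3)) none
              = ['1', '1', '0'] := by
          rw [pvCondA_iff]; exact ⟨_, hsplit⟩
        have hA : pvStepA (res ++ List.replicate ones '1', cnt) c
            = (res ++ List.replicate (ones - 2) '1', cnt + 1) := by
          simp only [pvStepA, if_pos hcond]
          rw [hsplit]
          have h1 : res ++ List.replicate (ones - 2) '1' ++ ['1', '1', '0']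
              = (((res ++ List.replicate (ones - 2) '1') ++ ['1']) ++ ['1']) ++ ['0'] := by
            simp
          rw [h1, List.dropLast_concat, List.dropLast_concat, List.dropLast_concat]
        have hB : pvStepB (res, ones, cnt) c = (res, ones - 2, cnt + 1) := by
          simp [pvStepB, hc0', h2]
        rw [hA, hB, ih res (ones - 2) (cnt + 1) hres]
      · -- flush: append the char; the pop condition cannot fire
        have hcond : ¬ (3 ≤ (res ++ List.replicate ones '1' ++ [c]).length ∧
            PySem.List.slice (res ++ List.replicate ones '1' ++ [c]) (some (-3)) none
              = ['1', '1', '0']) := by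
          rw [pvCondA_iff]
          rintro ⟨t, ht⟩
          have h' : (res ++ List.replicate ones '1') ++ [c] = (t ++ ['1', '1']) ++ ['0'] := by
            simpa using ht
          obtain ⟨heq, hc⟩ := pvConcat_inj _ _ _ _ h'
          -- so c = '0' and ones ≤ 1 (else hc0); derive res ends in '1'
          have hones : ¬ 2 ≤ ones := fun h => hc0 ⟨hc, h⟩
          interval_cases ones
          · simp only [List.replicate_zero, List.append_nil] at heq
            apply hres
            rw [heq]
            have : t ++ ['1', '1'] = (t ++ ['1']) ++ ['1'] := by simp
            rw [this, List.getLast?_concat]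
          · have heq2 : res ++ ['1'] = (t ++ ['1']) ++ ['1'] := by simpa using heq
            obtain ⟨heq', _⟩ := pvConcat_inj _ _ _ _ heq2
            apply hres
            rw [heq', List.getLast?_concat]
        have hA : pvStepA (res ++ List.replicate ones '1', cnt) c
            = ((res ++ List.replicate ones '1' ++ [c]) ++ List.replicate 0 '1', cnt) := by
          simp only [pvStepA, if_neg hcond]; simp
        have hB : pvStepB (res, ones, cnt) c
            = (res ++ List.replicate ones '1' ++ [c], 0, cnt) := by
          simp only [pvStepB]
          rw [if_neg hc1, if_neg hc0]
        have hlast : (res ++ List.replicate ones '1' ++ [c]).getLast? ≠ some '1' := by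
          rw [List.getLast?_concat]
          simp [hc1]
        rw [hA, hB, ih _ 0 cnt hlast]
  
theorem pvFind110_eq (x : String) : pvFind110 x = pvReduce x := by
  unfold pvFind110 pvReduce
  have h := pvLoop_eq x.toList [] 0 0 (by simp)
  simp only [List.replicate_zero, List.append_nil] at h
  rw [h]

-- ===== VERDICT (by name: the statement is the Claim_ definition above) =====
theorem solution_spec : Claim_equal_solution := by
  intro s _
  unfold Spec_solution solution solution_alt
  exact List.map_congr_left (fun x _ => pvFind110_eq x)
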